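-- pv_equiv track=rewrite | github.com/williamscole/HAPTIC | helper_functions.py | split_regions
-- ===== SOURCE A (Python) =====
-- import itertools as it
--
-- def split_regions(region_dict, new_region):
--
--     # returns the overlap of 2 regions (<= 0 if no overlap)
--     def overlap(region1, region2):
--         start1, end1 = region1
--         start2, end2 = region2
--         return min(end1,end2) - max(start1,start2)
--
--     # out region will be returned; is a dict of regions mapping to members of region
--     out_region = dict()
--
--     # overlapped keeps track of all the regions that overlap with the new region
--     overlapped = {tuple(new_region[:2]):[new_region[2]]}
--
--     # iterate through the existing regions
--     for region in sorted(region_dict):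
--
--         # if overlap
--         if overlap(region, new_region[:2]) > 0:
--
--             # the regions completely overlap, just add the member and return region dict
--             if tuple(region) == tuple(new_region[:2]):
--                 region_dict[region] += [new_region[2]]
--                 return region_dict
--
--             # bc the region overlaps, add it to overlapped
--             overlapped[region] = region_dict[region]
--
--         # no overlap, but add the region to the out_region dict
--         else:
--             out_region[region] = region_dict[region]
--
--     # all the segments in overlapped overlap, so each consecutive pairs of coordinates in sites should/could have different members
--     sites = sorted(set(it.chain(*overlapped)))
--
--     # iterate thru consecutive sites
--     for start, stop in zip(sites, sites[1:]):
--
--         # get the members of the regions that overlap the consecutive sites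
--         info = [j for i, j in overlapped.items() if overlap((start, stop), i) > 0]
--
--         # unpack the membership
--         out_region[(start,stop)] = sorted(it.chain(*info))
--
--     return out_region
-- ===== SOURCE B (Python) =====
-- def split_regions(region_dict, new_region):
--     # Loop inversion: instead of rescanning all overlapping regions for every
--     # consecutive pair of sites (as A does), distribute each overlapping region's
--     # members once over the index range of sub-intervals it covers.
--     # (A mutates region_dict in place in the exact-match case; B returns an equal
--     # new dict -- the equivalence is about the return value.)
--     s0, e0, member = new_region[0], new_region[1], new_region[2]
--     key = (s0, e0)
--
--     # exact match: same regions, with the member added to the matching one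
--     if e0 > s0 and key in region_dict:
--         return {k: v + [member] if k == key else v for k, v in region_dict.items()}
--
--     covers = lambda k: min(k[1], e0) > max(k[0], s0)
--     items = sorted(region_dict.items())
--     ivs = [(key, [member])] + [(k, v) for k, v in items if covers(k)]
--     out = {k: v for k, v in items if not covers(k)}
--
--     # boundary sites of the overlapping group, and the rank of each site
--     sites = sorted({p for k, _ in ivs for p in k})
--     pos = {s: i for i, s in enumerate(sites)}
--
--     # each interval deposits its members into every sub-interval bucket it spans
--     buckets = [[] for _ in range(len(sites) - 1)]
--     for (x, y), v in ivs:
--         for i in range(pos[x], pos[y]):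
--             buckets[i] = buckets[i] + v
--     for i in range(len(sites) - 1):
--         out[(sites[i], sites[i + 1])] = sorted(buckets[i])
--     return out
-- ===== Notes on version B (the rewrite author's own statement) =====
-- stated objective: alternative
-- what changed: A rescans the whole set of overlapping regions for every consecutive pair of sites (and rebuilds the updated dict entry by first-match assignment); B inverts the loops: it ranks the sites once, then each overlapping region deposits its members a single time into the index range of sub-interval buckets it spans, and the exact-match case rebuilds the dict with one comprehension.
import Mathlib
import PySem

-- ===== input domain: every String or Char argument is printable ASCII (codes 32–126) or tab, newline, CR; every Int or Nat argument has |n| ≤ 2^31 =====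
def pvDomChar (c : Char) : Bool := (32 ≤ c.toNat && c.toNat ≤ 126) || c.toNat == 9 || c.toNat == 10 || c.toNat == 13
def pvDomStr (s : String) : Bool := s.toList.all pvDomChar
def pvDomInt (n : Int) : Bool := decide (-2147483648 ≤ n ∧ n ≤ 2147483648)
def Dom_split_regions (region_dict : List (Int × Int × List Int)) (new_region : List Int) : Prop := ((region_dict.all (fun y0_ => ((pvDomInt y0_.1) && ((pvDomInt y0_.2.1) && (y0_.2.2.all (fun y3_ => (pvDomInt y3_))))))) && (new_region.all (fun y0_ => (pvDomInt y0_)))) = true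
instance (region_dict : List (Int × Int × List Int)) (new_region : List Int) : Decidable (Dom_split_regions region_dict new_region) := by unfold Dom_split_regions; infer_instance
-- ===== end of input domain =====

-- B inverts A's loops: instead of rescanning every overlapping region for each pair of consecutive
-- sites, it deposits each overlapping region's members once into the index range of sub-interval
-- buckets the region spans (an alternative algorithm; no speed claim).
-- A mutates region_dict in place in the exact-match case; the equivalence is about the return value.

-- ===== PORT A =====

-- helper 'overlap' of A
def aOverlap (r1 r2 : Int × Int) : Int := min r1.2 r2.2 - max r1.1 r2.1

-- region_dict[k] (key present where used)
def aGet : List (Int × Int × List Int) → Int × Int → List Int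
  | [], _ => []
  | (a, b, v) :: t, k => if (a, b) = k then v else aGet t k

-- region_dict[region] += [x]  (update in place at the key's position)
def aAppendAt : List (Int × Int × List Int) → Int × Int → Int → List (Int × Int × List Int)
  | [], _, _ => []
  | (a, b, v) :: t, k, m => if (a, b) = k then (a, b, v ++ [m]) :: t else (a, b, v) :: aAppendAt t k m

-- A's first loop over sorted(region_dict): early return (some …) on complete overlap,
-- otherwise accumulates the out_region and overlapped dicts.
def aScan (rd : List (Int × Int × List Int)) (s0 e0 m : Int) :
    List (Int × Int) → PySem.Dict (Int × Int) (List Int) → PySem.Dict (Int × Int) (List Int) →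
    Option (List (Int × Int × List Int)) × PySem.Dict (Int × Int) (List Int) × PySem.Dict (Int × Int) (List Int)
  | [], out, ov => (none, out, ov)
  | k :: ks, out, ov =>
    if aOverlap k (s0, e0) > 0 then
      if k = (s0, e0) then (some (aAppendAt rd k m), out, ov)
      else aScan rd s0 e0 m ks out (ov.insert k (aGet rd k))
    else aScan rd s0 e0 m ks (out.insert k (aGet rd k)) ov

-- sorted(it.chain(*info)) for one pair of consecutive sites
def aPairVal (ov : PySem.Dict (Int × Int) (List Int)) (a b : Int) : List Int :=
  PySem.List.sorted (((ov.items.filter (fun kv => aOverlap (a, b) kv.1 > 0)).map (·.2)).flatten) (fun x => x) false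

-- A's second loop over zip(sites, sites[1:])
def aPairs (ov : PySem.Dict (Int × Int) (List Int)) (pairs : List (Int × Int))
    (out : PySem.Dict (Int × Int) (List Int)) : PySem.Dict (Int × Int) (List Int) :=
  pairs.foldl (fun o p => o.insert p (aPairVal ov p.1 p.2)) out

def split_regions (region_dict : List (Int × Int × List Int)) (new_region : List Int) : List (Int × Int × List Int) :=
  match new_region with
  | s0 :: e0 :: m :: _ =>
    let keys := PySem.List.sorted2 (region_dict.map fun r => (r.1, r.2.1)) (·.1) (·.2)
    match aScan region_dict s0 e0 m keys PySem.Dict.empty (PySem.Dict.empty.insert (s0, e0) [m]) with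
    | (some res, _, _) => res
    | (none, out, ov) =>
      let sites := PySem.List.sorted (PySem.Set.ofList (ov.items.flatMap fun kv => [kv.1.1, kv.1.2])) (fun x => x) false
      (aPairs ov (sites.zip sites.tail) out).items.map fun kv => (kv.1.1, kv.1.2, kv.2)
  | _ => []   -- new_region[2] raises IndexError: excluded by Pre_

-- ===== PORT B =====

-- {k: v + [member] if k == key else v for k, v in region_dict.items()}
def bBump (rd : List (Int × Int × List Int)) (s0 e0 m : Int) : List (Int × Int × List Int) :=
  rd.map (fun r => if (r.1, r.2.1) = (s0, e0) then (r.1, r.2.1, r.2.2 ++ [m]) else r)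

-- covers = lambda k: min(k[1], e0) > max(k[0], s0)
def bCovers (s0 e0 : Int) (k : Int × Int) : Bool := decide (min k.2 e0 > max k.1 s0)

-- for i in range(p, q): buckets[i] = buckets[i] + v
def bDistrib (p q : Int) (v : List Int) (bs : List (List Int)) : List (List Int) :=
  (PySem.List.pyRange p q 1).foldl
    (fun bs i => PySem.List.pySetD bs i (PySem.List.pyGetD bs i [] ++ v)) bs

def split_regions_alt (region_dict : List (Int × Int × List Int)) (new_region : List Int) : List (Int × Int × List Int) :=
  match new_region with
  | [] => []
  | [_] => []
  | [_, _] => []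
  | s0 :: e0 :: m :: _ =>
    if e0 > s0 && (region_dict.map (fun r => (r.1, r.2.1))).contains (s0, e0) then
      bBump region_dict s0 e0 m
    else
      let items := PySem.List.sorted2 region_dict (fun r => r.1) (fun r => r.2.1)
      let ivs := ((s0, e0), [m]) :: (items.filter (fun r => bCovers s0 e0 (r.1, r.2.1))).map (fun r => ((r.1, r.2.1), r.2.2))
      let out0 := (items.filter (fun r => !bCovers s0 e0 (r.1, r.2.1))).foldl
          (fun d r => d.insert (r.1, r.2.1) r.2.2) (PySem.Dict.empty : PySem.Dict (Int × Int) (List Int))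
      let sites := PySem.List.sorted (PySem.Set.ofList (ivs.flatMap (fun kv => [kv.1.1, kv.1.2]))) (fun x => x) false
      let pos := (PySem.List.enumerate sites 0).foldl (fun d p => d.insert p.2 p.1) (PySem.Dict.empty : PySem.Dict Int Int)
      let buckets := ivs.foldl (fun bs kv => bDistrib (pos.getD kv.1.1 0) (pos.getD kv.1.2 0) kv.2 bs)
          (List.replicate (sites.length - 1) ([] : List Int))
      let out := (PySem.List.pyRange 0 ((sites.length : Int) - 1) 1).foldl
          (fun d i => d.insert (PySem.List.pyGetD sites i 0, PySem.List.pyGetD sites (i + 1) 0)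
            (PySem.List.sorted (PySem.List.pyGetD buckets i []) (fun x => x) false)) out0
      out.items.map (fun kv => (kv.1.1, kv.1.2, kv.2))

-- ===== PRECONDITION & SPEC =====
-- Pre_ excludes new_region shorter than 3 (A raises IndexError there) and association lists with
-- duplicate region keys, which do not represent a Python dict (A's input is a dict, so such lists
-- never arise; their assoc-list reading is accidental).
def Pre_split_regions (region_dict : List (Int × Int × List Int)) (new_region : List Int) : Prop :=
  3 ≤ new_region.length ∧ (region_dict.map (fun r => (r.1, r.2.1))).Nodup
instance (region_dict : List (Int × Int × List Int)) (new_region : List Int) : Decidable (Pre_split_regions region_dict new_region) := by unfold Pre_split_regions; infer_instance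
def pvWitness_split_regions : (List (Int × Int × List Int)) × List Int := ([(0, 10, [1])], [5, 15, 2])

def Spec_split_regions (region_dict : List (Int × Int × List Int)) (new_region : List Int) (out : List (Int × Int × List Int)) : Prop := out = split_regions_alt region_dict new_region
instance (region_dict : List (Int × Int × List Int)) (new_region : List Int) (out : List (Int × Int × List Int)) : Decidable (Spec_split_regions region_dict new_region out) := by unfold Spec_split_regions; infer_instance

-- ===== CLAIM (what is proved, stated in full; the proofs are below) =====
def Claim_equal_split_regions : Prop := ∀ (region_dict : List (Int × Int × List Int)) (new_region : List Int), Dom_split_regions region_dict new_region → Pre_split_regions region_dict new_region → Spec_split_regions region_dict new_region (split_regions region_dict new_region)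

-- ===== LEMMAS AND PROOFS =====

def svKey (r : Int × Int × List Int) : Int × Int := (r.1, r.2.1)

-- ---- A-side: the first loop as filters, and the early return ----

theorem aScan_exit (rd : List (Int × Int × List Int)) (s0 e0 m : Int)
    (ks : List (Int × Int)) (out ov : PySem.Dict (Int × Int) (List Int))
    (hmem : (s0, e0) ∈ ks) (hlt : s0 < e0) :
    (aScan rd s0 e0 m ks out ov).1 = some (aAppendAt rd (s0, e0) m) := by
  induction ks generalizing out ov with
  | nil => simp at hmem
  | cons k ks ih =>
    by_cases hk : k = (s0, e0)
    · subst hk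
      have hpos : aOverlap (s0, e0) (s0, e0) > 0 := by simp [aOverlap]; omega
      simp [aScan, hpos]
    · have hmem' : (s0, e0) ∈ ks := by
        rcases List.mem_cons.mp hmem with h | h
        · exact absurd h.symm hk
        · exact h
      by_cases hpos : aOverlap k (s0, e0) > 0
      · simp [aScan, hpos, hk, ih _ _ hmem']
      · simp [aScan, hpos, ih _ _ hmem']

theorem aScan_no_exit (rd : List (Int × Int × List Int)) (s0 e0 m : Int)
    (ks : List (Int × Int)) (out ov : PySem.Dict (Int × Int) (List Int))
    (h : ∀ k ∈ ks, aOverlap k (s0, e0) > 0 → k ≠ (s0, e0)) :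
    aScan rd s0 e0 m ks out ov =
      (none,
       (ks.filter (fun k => !decide (aOverlap k (s0, e0) > 0))).foldl (fun d k => d.insert k (aGet rd k)) out,
       (ks.filter (fun k => decide (aOverlap k (s0, e0) > 0))).foldl (fun d k => d.insert k (aGet rd k)) ov) := by
  induction ks generalizing out ov with
  | nil => rfl
  | cons k ks ih =>
    have htail : ∀ k' ∈ ks, aOverlap k' (s0, e0) > 0 → k' ≠ (s0, e0) := fun k' hm => h k' (List.mem_cons_of_mem _ hm)
    by_cases hpos : aOverlap k (s0, e0) > 0
    · have hk : ¬ k = (s0, e0) := h k List.mem_cons_self hpos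
      simp [aScan, hpos, hk, ih _ _ htail]
    · simp [aScan, hpos, ih _ _ htail]

theorem cond_funext (s0 e0 : Int) :
    (fun k : Int × Int => decide (aOverlap k (s0, e0) > 0)) = (fun k : Int × Int => bCovers s0 e0 k) := by
  funext k
  rw [bCovers, decide_eq_decide]
  simp [aOverlap]

-- ---- first-match lookup on a duplicate-free association list ----

theorem aGet_of_mem : ∀ (rd : List (Int × Int × List Int)), (rd.map svKey).Nodup →
    ∀ r ∈ rd, aGet rd (r.1, r.2.1) = r.2.2 := by
  intro rd
  induction rd with
  | nil => intro _ r hr; simp at hr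
  | cons h t ih =>
    obtain ⟨a, b, v⟩ := h
    intro hnd r hr
    rw [List.map_cons, List.nodup_cons] at hnd
    rcases List.mem_cons.mp hr with rfl | hr'
    · simp [aGet]
    · have hne : ¬((a, b) = (r.1, r.2.1)) := by
        intro he
        apply hnd.1
        show (a, b) ∈ t.map svKey
        rw [he]
        exact List.mem_map_of_mem (f := svKey) hr'
      simpa [aGet, hne] using ih hnd.2 r hr'

-- ---- exact-match branch: first-match append = rebuild-all map ----

theorem bBump_id (s0 e0 m : Int) : ∀ (t : List (Int × Int × List Int)),
    (s0, e0) ∉ t.map svKey → bBump t s0 e0 m = t := by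
  intro t
  induction t with
  | nil => intro _; rfl
  | cons r t ih =>
    intro h
    have h1 : ¬((r.1, r.2.1) = (s0, e0)) := by
      intro he
      exact h (by simp [svKey, ← he])
    have h2 : (s0, e0) ∉ t.map svKey := fun hm => h (List.mem_cons_of_mem _ hm)
    simp only [bBump, List.map_cons, if_neg h1]
    rw [← bBump, ih h2]

theorem aAppendAt_eq_bBump (s0 e0 m : Int) : ∀ (rd : List (Int × Int × List Int)),
    (rd.map svKey).Nodup → aAppendAt rd (s0, e0) m = bBump rd s0 e0 m := by
  intro rd
  induction rd with
  | nil => intro _; rfl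
  | cons h t ih =>
    obtain ⟨a, b, v⟩ := h
    intro hnd
    rw [List.map_cons, List.nodup_cons] at hnd
    by_cases hk : (a, b) = (s0, e0)
    · simp only [aAppendAt, bBump, List.map_cons, if_pos hk]
      rw [← bBump, bBump_id s0 e0 m t (show (s0, e0) ∉ t.map svKey from hk ▸ hnd.1)]
    · simp only [aAppendAt, bBump, List.map_cons, if_neg hk]
      rw [← bBump, ih hnd.2]

-- ---- stable two-key sort commutes with taking the key ----

theorem map_insertBy {α β : Type} (f : α → β) (b : α → α → Bool) (b' : β → β → Bool)
    (hb : ∀ u v, b u v = b' (f u) (f v)) (x : α) : ∀ (acc : List α),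
    (PySem.List.insertBy b x acc).map f = PySem.List.insertBy b' (f x) (acc.map f) := by
  intro acc
  induction acc with
  | nil => simp [PySem.List.insertBy]
  | cons y ys ih =>
    by_cases h : b x y
    · have h' : b' (f x) (f y) = true := by rw [← hb]; exact h
      simp [PySem.List.insertBy, h, h']
    · have h' : ¬ (b' (f x) (f y) = true) := by rw [← hb]; exact h
      simp [PySem.List.insertBy, h, h', ih]

theorem map_foldl_insertBy {α β : Type} (f : α → β) (b : α → α → Bool) (b' : β → β → Bool)
    (hb : ∀ u v, b u v = b' (f u) (f v)) :
    ∀ (xs : List α) (acc : List α),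
      (xs.foldl (fun acc x => PySem.List.insertBy b x acc) acc).map f
        = (xs.map f).foldl (fun acc y => PySem.List.insertBy b' y acc) (acc.map f) := by
  intro xs
  induction xs with
  | nil => intro acc; rfl
  | cons x xs ih =>
    intro acc
    rw [List.foldl_cons, List.map_cons, List.foldl_cons, ih, map_insertBy f b b' hb]

theorem sorted2_map_key (rd : List (Int × Int × List Int)) :
    (PySem.List.sorted2 rd (fun r => r.1) (fun r => r.2.1)).map svKey
      = PySem.List.sorted2 (rd.map svKey) (fun k => k.1) (fun k => k.2) := by
  exact map_foldl_insertBy svKey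
    (fun u v => decide (u.1 < v.1) || !decide (v.1 < u.1) && decide (u.2.1 < v.2.1))
    (fun u v => decide (u.1 < v.1) || !decide (v.1 < u.1) && decide (u.2 < v.2))
    (fun _ _ => rfl) rd []

-- ---- the rank dict: pos[sites[j]] = j ----

theorem mem_enumerate_getElem {α : Type} : ∀ (xs : List α) (s : Int) (j : Nat) (hj : j < xs.length),
    ((s + (j : Int)), xs[j]) ∈ PySem.List.enumerate xs s := by
  intro xs
  induction xs with
  | nil => intro s j hj; simp at hj
  | cons x t ih =>
    intro s j hj
    cases j with
    | zero => simp [PySem.List.enumerate_cons]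
    | succ k =>
      rw [PySem.List.enumerate_cons]
      refine List.mem_cons_of_mem _ ?_
      have hk : k < t.length := by simpa using hj
      have he : ((s + ((k + 1 : Nat) : Int)), (x :: t)[k + 1]) = (((s + 1) + (k : Int)), t[k]) := by
        simp
        omega
      rw [he]
      exact ih (s + 1) k hk

theorem pos_getD (sites : List Int) (hnd : sites.Nodup) (j : Nat) (hj : j < sites.length) :
    ((PySem.List.enumerate sites 0).foldl (fun d p => d.insert p.2 p.1)
      (PySem.Dict.empty : PySem.Dict Int Int)).getD sites[j] 0 = (j : Int) := by
  set d := (PySem.List.enumerate sites 0).foldl (fun d p => d.insert p.2 p.1)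
      (PySem.Dict.empty : PySem.Dict Int Int) with hd
  have hitems : d.items = (PySem.List.enumerate sites 0).map (fun p => (p.2, p.1)) := by
    rw [hd]
    rw [PySem.Dict.items_foldl_insert_fresh (PySem.List.enumerate sites 0) (fun p => p.2) (fun p => p.1)
      PySem.Dict.empty (by intro a _; simp) (by rw [PySem.List.map_snd_enumerate]; exact hnd)]
    rw [show (PySem.Dict.empty : PySem.Dict Int Int).items = [] from rfl, List.nil_append]
  have hkeys : d.keys = sites := by
    simp only [PySem.Dict.keys, hitems, List.map_map]
    exact PySem.List.map_snd_enumerate sites 0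
  have hmem : (sites[j], (j : Int)) ∈ d.items := by
    rw [hitems]
    have := mem_enumerate_getElem sites 0 j hj
    rw [zero_add] at this
    exact List.mem_map_of_mem this
  exact PySem.Dict.getD_of_mem_items d hmem (hkeys ▸ hnd) 0

-- ---- strictly sorted sites: index order is value order ----

theorem getElem_le_iff (sites : List Int) (hpw : sites.Pairwise (· < ·)) (i j : Nat)
    (hi : i < sites.length) (hj : j < sites.length) : sites[i] ≤ sites[j] ↔ i ≤ j := by
  constructor
  · intro h
    by_contra hc
    have hji : j < i := by omega
    have := List.pairwise_iff_getElem.mp hpw j i hj hi hji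
    omega
  · intro h
    rcases Nat.eq_or_lt_of_le h with rfl | h'
    · exact le_refl _
    · exact le_of_lt (List.pairwise_iff_getElem.mp hpw i j hi hj h')

-- overlap of the j-th sub-interval with a region whose endpoints are sites
theorem cover_iff (sites : List Int) (hpw : sites.Pairwise (· < ·))
    (ix iy j : Nat) (hix : ix < sites.length) (hiy : iy < sites.length) (hj1 : j + 1 < sites.length) :
    (0 < aOverlap (sites[j], sites[j + 1]) (sites[ix], sites[iy]))
      ↔ ((ix : Int) ≤ (j : Int) ∧ (j : Int) < (iy : Int)) := by
  have hj : j < sites.length := by omega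
  have hxa := getElem_le_iff sites hpw ix j hix hj
  have hax := getElem_le_iff sites hpw j ix hj hix
  have hya := getElem_le_iff sites hpw iy j hiy hj
  have hay := getElem_le_iff sites hpw j iy hj hiy
  have hbx := getElem_le_iff sites hpw (j + 1) ix hj1 hix
  have hxb := getElem_le_iff sites hpw ix (j + 1) hix hj1
  have hab : sites[j] < sites[j + 1] := List.pairwise_iff_getElem.mp hpw j (j + 1) hj hj1 (by omega)
  simp only [aOverlap, min_def, max_def]
  split_ifs <;> omega

-- ---- bucket distribution ----

theorem bDistrib_stop (p q : Int) (v : List Int) (bs : List (List Int)) (h : q ≤ p) :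
    bDistrib p q v bs = bs := by
  rw [bDistrib, PySem.List.pyRange_one_eq_nil h]
  rfl

theorem bDistrib_step (p q : Int) (v : List Int) (bs : List (List Int)) (h : p < q) :
    bDistrib p q v bs
      = bDistrib (p + 1) q v (PySem.List.pySetD bs p (PySem.List.pyGetD bs p [] ++ v)) := by
  rw [bDistrib, PySem.List.pyRange_one_cons h]
  rfl

theorem bDistrib_length (v : List Int) (n : Nat) : ∀ (p q : Int), (q - p).toNat = n →
    ∀ (bs : List (List Int)), (bDistrib p q v bs).length = bs.length := by
  induction n with
  | zero =>
    intro p q hn bs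
    rw [bDistrib_stop p q v bs (by omega)]
  | succ k ih =>
    intro p q hn bs
    rw [bDistrib_step p q v bs (by omega), ih (p + 1) q (by omega), PySem.List.length_pySetD]

theorem bDistrib_getD (v : List Int) (n : Nat) : ∀ (p q : Int), (q - p).toNat = n →
    ∀ (bs : List (List Int)), 0 ≤ p → q ≤ (bs.length : Int) → ∀ j : Nat,
      (bDistrib p q v bs).getD j []
        = bs.getD j [] ++ (if p ≤ (j : Int) ∧ (j : Int) < q then v else []) := by
  induction n with
  | zero =>
    intro p q hn bs _ _ j
    rw [bDistrib_stop p q v bs (by omega)]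
    have hc : ¬(p ≤ (j : Int) ∧ (j : Int) < q) := by omega
    simp [hc]
  | succ k ih =>
    intro p q hn bs hp hq j
    have hpq : p < q := by omega
    have hplen : p < (bs.length : Int) := lt_of_lt_of_le hpq hq
    rw [bDistrib_step p q v bs hpq,
      ih (p + 1) q (by omega) _ (by omega) (by rw [PySem.List.length_pySetD]; exact hq) j,
      PySem.List.pySetD_of_nonneg _ _ hp]
    have hgp : PySem.List.pyGetD bs p [] = bs[p.toNat]'(by omega) :=
      PySem.List.pyGetD_eq_getElem bs [] hp hplen
    rw [List.getD_eq_getElem?_getD, List.getElem?_set, List.getD_eq_getElem?_getD]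
    by_cases hjp : p.toNat = j
    · have h1 : p ≤ (j : Int) ∧ (j : Int) < q := by omega
      have h2 : ¬(p + 1 ≤ (j : Int) ∧ (j : Int) < q) := by omega
      have hjlen : j < bs.length := by omega
      rw [if_pos hjp, if_pos (by omega : p.toNat < bs.length), if_neg h2, if_pos h1, hgp,
        List.getElem?_eq_getElem hjlen]
      have hpj : bs[p.toNat]'(by omega) = bs[j]'hjlen := by congr 1
      rw [hpj]
      simp
    · have h12 : (p + 1 ≤ (j : Int) ∧ (j : Int) < q) ↔ (p ≤ (j : Int) ∧ (j : Int) < q) := by omega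
      rw [if_neg hjp, if_congr h12 rfl rfl]

theorem distrib_fold (P Q : (Int × Int) × List Int → Int) :
    ∀ (ivs : List ((Int × Int) × List Int)) (bs : List (List Int)),
      (∀ kv ∈ ivs, 0 ≤ P kv ∧ Q kv ≤ (bs.length : Int)) →
      ((ivs.foldl (fun bs kv => bDistrib (P kv) (Q kv) kv.2 bs) bs).length = bs.length ∧
       ∀ j : Nat,
         (ivs.foldl (fun bs kv => bDistrib (P kv) (Q kv) kv.2 bs) bs).getD j []
           = bs.getD j []
             ++ ((ivs.filter (fun kv => decide (P kv ≤ (j : Int) ∧ (j : Int) < Q kv))).map (·.2)).flatten) := by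
  intro ivs
  induction ivs with
  | nil => intro bs _; simp
  | cons kv ivs ih =>
    intro bs hh
    have h0 := hh kv List.mem_cons_self
    have hlen : (bDistrib (P kv) (Q kv) kv.2 bs).length = bs.length :=
      bDistrib_length kv.2 (Q kv - P kv).toNat (P kv) (Q kv) rfl bs
    have htail : ∀ kv' ∈ ivs, 0 ≤ P kv' ∧ Q kv' ≤ ((bDistrib (P kv) (Q kv) kv.2 bs).length : Int) := by
      rw [hlen]
      exact fun kv' h => hh kv' (List.mem_cons_of_mem _ h)
    obtain ⟨ihlen, ihget⟩ := ih _ htail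
    constructor
    · rw [List.foldl_cons, ihlen, hlen]
    · intro j
      rw [List.foldl_cons, ihget j,
        bDistrib_getD kv.2 (Q kv - P kv).toNat (P kv) (Q kv) rfl bs h0.1 h0.2 j, List.filter_cons]
      by_cases hc : P kv ≤ (j : Int) ∧ (j : Int) < Q kv
      · simp [hc, List.append_assoc]
      · simp [hc]

-- ---- A's zip of consecutive sites as an index range ----

theorem zip_tail_eq_range_map (sites : List Int) :
    sites.zip sites.tail
      = (List.range (sites.length - 1)).map (fun k => (sites.getD k 0, sites.getD (k + 1) 0)) := by
  apply List.ext_getElem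
  · simp [List.length_zip]
  · intro i h1 h2
    have hi : i < sites.length - 1 := by simpa using h2
    have hi1 : i + 1 < sites.length := by omega
    rw [List.getElem_zip]
    simp only [List.getElem_map, List.getElem_range]
    rw [List.getD_eq_getElem sites 0 (by omega), List.getD_eq_getElem sites 0 hi1]
    congr 1
    rw [List.getElem_tail]

theorem foldl_pyRange_range {β : Type} (m : Int) (F : β → Int → β) (init : β) :
    (PySem.List.pyRange 0 m 1).foldl F init
      = (List.range m.toNat).foldl (fun b (k : Nat) => F b ((k : Nat) : Int)) init := by
  rw [PySem.List.pyRange_one]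
  have h : (m - 0).toNat = m.toNat := by omega
  rw [h, List.foldl_map (f := fun k : Nat => (0 : Int) + (k : Int)) (g := F)
    (l := List.range m.toNat) (init := init)]
  exact PySem.List.foldl_congr_mem _ _ _ init (fun acc x _ => by rw [zero_add])

theorem aPairs_range (ov : PySem.Dict (Int × Int) (List Int)) (sites : List Int)
    (out : PySem.Dict (Int × Int) (List Int)) :
    aPairs ov (sites.zip sites.tail) out
      = (List.range (sites.length - 1)).foldl
          (fun o k => o.insert (sites.getD k 0, sites.getD (k + 1) 0)
            (aPairVal ov (sites.getD k 0) (sites.getD (k + 1) 0))) out := by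
  rw [aPairs, zip_tail_eq_range_map, List.foldl_map]

-- ===== VERDICT proof =====

theorem split_regions_spec : Claim_equal_split_regions := by
  unfold Claim_equal_split_regions Spec_split_regions
  intro rd nr _dom hpre
  obtain ⟨hlen, hnodup⟩ := hpre
  match nr, hlen with
  | s0 :: e0 :: m :: rest, _ =>
  simp only [split_regions, split_regions_alt]
  have hnodup' : (rd.map svKey).Nodup := by simpa [svKey] using hnodup
  set keys := PySem.List.sorted2 (rd.map fun r => (r.1, r.2.1)) (·.1) (·.2) with hkeys
  set itemsB := PySem.List.sorted2 rd (fun r => r.1) (fun r => r.2.1) with hitemsB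
  have hkmap : itemsB.map svKey = keys := by
    rw [hkeys, hitemsB, sorted2_map_key]
    rfl
  have hpermB : itemsB.Perm rd := PySem.List.sorted2_perm _ _ _ _
  have hperm : keys.Perm (rd.map fun r => (r.1, r.2.1)) := PySem.List.sorted2_perm _ _ _ _
  by_cases hc : s0 < e0 ∧ (s0, e0) ∈ rd.map (fun r => (r.1, r.2.1))
  · -- complete-overlap early return
    have hb : (e0 > s0 && (rd.map (fun r => (r.1, r.2.1))).contains (s0, e0)) = true := by
      simp only [Bool.and_eq_true, decide_eq_true_eq, List.contains_iff_mem]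
      exact ⟨hc.1, hc.2⟩
    rw [if_pos hb]
    have h1 := aScan_exit rd s0 e0 m keys PySem.Dict.empty (PySem.Dict.empty.insert (s0, e0) [m])
      (hperm.mem_iff.mpr hc.2) hc.1
    rcases hsc : aScan rd s0 e0 m keys PySem.Dict.empty (PySem.Dict.empty.insert (s0, e0) [m]) with ⟨o, outD, ovD⟩
    rw [hsc] at h1
    simp only at h1
    subst h1
    exact aAppendAt_eq_bBump s0 e0 m rd hnodup'
  · -- no complete overlap: the splitting path
    have hb : ¬ ((e0 > s0 && (rd.map (fun r => (r.1, r.2.1))).contains (s0, e0)) = true) := by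
      simp only [Bool.and_eq_true, decide_eq_true_eq, List.contains_iff_mem]
      intro h
      exact hc ⟨h.1, h.2⟩
    rw [if_neg hb]
    have hnoexit : ∀ k ∈ keys, aOverlap k (s0, e0) > 0 → k ≠ (s0, e0) := by
      intro k hk hpos hke
      subst hke
      have hlt : s0 < e0 := by simpa [aOverlap] using hpos
      exact hc ⟨hlt, hperm.mem_iff.mp hk⟩
    rw [aScan_no_exit rd s0 e0 m keys _ _ hnoexit]
    simp only
    -- identify the filtered key lists with filtered item lists
    have hfval : ∀ (p : (Int × Int) → Bool),
        keys.filter p = (itemsB.filter (fun r => p (r.1, r.2.1))).map svKey := by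
      intro p
      rw [← hkmap, List.filter_map]
      rfl
    have hmem_rd : ∀ r ∈ itemsB, r ∈ rd := fun r hr => hpermB.mem_iff.mp hr
    -- the overlapped dict's items
    set pov := (fun k : Int × Int => decide (aOverlap k (s0, e0) > 0)) with hpov
    have hpcov : ∀ r : Int × Int × List Int, pov (r.1, r.2.1) = bCovers s0 e0 (r.1, r.2.1) := by
      intro r
      rw [hpov]
      exact congrFun (cond_funext s0 e0) _
    set ivsB := ((s0, e0), [m]) :: (itemsB.filter (fun r => bCovers s0 e0 (r.1, r.2.1))).map (fun r => ((r.1, r.2.1), r.2.2)) with hivsB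
    have hfiltB : itemsB.filter (fun r => pov (r.1, r.2.1)) = itemsB.filter (fun r => bCovers s0 e0 (r.1, r.2.1)) := by
      apply List.filter_congr
      intro r _
      exact hpcov r
    have hivsmap : (keys.filter pov).map (fun k => (k, aGet rd k))
        = (itemsB.filter (fun r => bCovers s0 e0 (r.1, r.2.1))).map (fun r => ((r.1, r.2.1), r.2.2)) := by
      rw [hfval pov, List.map_map, hfiltB]
      apply List.map_congr_left
      intro r hr
      have hrrd : r ∈ rd := hmem_rd r (List.mem_of_mem_filter hr)
      simp only [Function.comp, svKey]
      rw [aGet_of_mem rd hnodup' r hrrd]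
    -- overlapped dict: fresh distinct keys appended to {key: [member]}
    have hkeysnd : keys.Nodup := (hperm.nodup_iff).mpr hnodup
    have hfresh : ∀ k ∈ keys.filter pov,
        (PySem.Dict.empty.insert (s0, e0) [m]).contains k = false := by
      intro k hk
      have hne := hnoexit k (List.mem_of_mem_filter hk) (by simpa [hpov] using List.of_mem_filter hk)
      simp [PySem.Dict.contains_insert, hne]
    have hnd2 : ((keys.filter pov).map (fun a => a)).Nodup := by
      simpa using hkeysnd.filter _
    have hovitems : (List.foldl (fun d k => d.insert k (aGet rd k)) (PySem.Dict.empty.insert (s0, e0) [m])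
        (keys.filter pov)).items = ivsB := by
      rw [PySem.Dict.items_foldl_insert_fresh _ (fun a => a) (fun a => aGet rd a) _ hfresh hnd2]
      rw [hivsB, ← hivsmap]
      rfl
    have hov : List.foldl (fun d k => d.insert k (aGet rd k)) (PySem.Dict.empty.insert (s0, e0) [m])
        (keys.filter pov) = PySem.Dict.mk ivsB := PySem.Dict.ext hovitems
    rw [hov, show (PySem.Dict.mk ivsB).items = ivsB from rfl]
    -- the disjoint-region base dict
    have hout0 : (keys.filter (fun k => !pov k)).foldl (fun d k => d.insert k (aGet rd k))
          (PySem.Dict.empty : PySem.Dict (Int × Int) (List Int))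
        = (itemsB.filter (fun r => !bCovers s0 e0 (r.1, r.2.1))).foldl
            (fun d r => d.insert (r.1, r.2.1) r.2.2) PySem.Dict.empty := by
      rw [hfval (fun k => !pov k), List.foldl_map]
      have hfilt : itemsB.filter (fun r => !pov (r.1, r.2.1))
          = itemsB.filter (fun r => !bCovers s0 e0 (r.1, r.2.1)) := by
        apply List.filter_congr
        intro r _
        rw [hpcov r]
      rw [hfilt]
      apply PySem.List.foldl_congr_mem
      intro d r hr
      have hrrd : r ∈ rd := hmem_rd r (List.mem_of_mem_filter hr)
      simp only [svKey]
      rw [aGet_of_mem rd hnodup' r hrrd]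
    rw [hout0]
    -- sites and their properties
    set sites := PySem.List.sorted (PySem.Set.ofList (ivsB.flatMap fun kv => [kv.1.1, kv.1.2])) (fun x => x) false with hsites
    have hpw : sites.Pairwise (· < ·) := PySem.List.sorted_ofList_pairwise_lt _
    have hsnd : sites.Nodup := hpw.nodup
    have hmemS : ∀ kv ∈ ivsB, kv.1.1 ∈ sites ∧ kv.1.2 ∈ sites := by
      intro kv hkv
      constructor <;>
      · rw [hsites, PySem.List.mem_sorted, PySem.Set.mem_ofList]
        exact List.mem_flatMap.mpr ⟨kv, hkv, by simp⟩
    set n := sites.length with hn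
    have hn1 : 1 ≤ n := by
      have : (s0 : Int) ∈ sites := (hmemS ((s0, e0), [m]) List.mem_cons_self).1
      have := List.length_pos_of_mem this
      omega
    set pos := (PySem.List.enumerate sites 0).foldl (fun d p => d.insert p.2 p.1)
        (PySem.Dict.empty : PySem.Dict Int Int) with hposd
    -- every endpoint's rank is a valid index, and the bucket hypothesis holds
    have hrank : ∀ x ∈ sites, ∃ ix : Nat, ix < n ∧ sites[ix]? = some x ∧ pos.getD x 0 = (ix : Int) := by
      intro x hx
      obtain ⟨ix, hix, hgx⟩ := List.mem_iff_getElem.mp hx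
      refine ⟨ix, hix, by rw [List.getElem?_eq_getElem hix, hgx], ?_⟩
      rw [← hgx]
      exact pos_getD sites hsnd ix hix
    set buckets := ivsB.foldl (fun bs kv => bDistrib (pos.getD kv.1.1 0) (pos.getD kv.1.2 0) kv.2 bs)
        (List.replicate (n - 1) ([] : List Int)) with hbuckets
    have hbhyp : ∀ kv ∈ ivsB, 0 ≤ pos.getD kv.1.1 0 ∧ pos.getD kv.1.2 0 ≤ ((List.replicate (n - 1) ([] : List Int)).length : Int) := by
      intro kv hkv
      obtain ⟨ix, hix, _, hpx⟩ := hrank kv.1.1 (hmemS kv hkv).1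
      obtain ⟨iy, hiy, _, hpy⟩ := hrank kv.1.2 (hmemS kv hkv).2
      rw [hpx, hpy, List.length_replicate]
      constructor
      · positivity
      · omega
    obtain ⟨hblen, hbget⟩ := distrib_fold (fun kv => pos.getD kv.1.1 0) (fun kv => pos.getD kv.1.2 0) ivsB _ hbhyp
    -- per-sub-interval values agree
    have hval : ∀ k : Nat, k < n - 1 →
        aPairVal (PySem.Dict.mk ivsB) (sites.getD k 0) (sites.getD (k + 1) 0)
          = PySem.List.sorted (PySem.List.pyGetD buckets (k : Int) []) (fun x => x) false := by
      intro k hk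
      have hk1 : k + 1 < n := by omega
      have hkn : k < n := by omega
      have hkb : (k : Int) < (buckets.length : Int) := by
        rw [hbuckets, hblen, List.length_replicate]
        exact_mod_cast hk
      have hbget' : PySem.List.pyGetD buckets (k : Int) []
          = ((ivsB.filter (fun kv => decide (pos.getD kv.1.1 0 ≤ (k : Int) ∧ (k : Int) < pos.getD kv.1.2 0))).map (·.2)).flatten := by
        rw [PySem.List.pyGetD_natCast, hbuckets, hbget k]
        have : (List.replicate (n - 1) ([] : List Int)).getD k [] = [] := by
          rw [List.getD_eq_getElem?_getD, List.getElem?_replicate]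
          split <;> rfl
        rw [this]
        rfl
      have hitemsmk : (PySem.Dict.mk ivsB).items = ivsB := rfl
      have hfe : (PySem.Dict.mk ivsB).items.filter
            (fun kv => decide (aOverlap (sites.getD k 0, sites.getD (k + 1) 0) kv.1 > 0))
          = ivsB.filter (fun kv => decide (pos.getD kv.1.1 0 ≤ (k : Int) ∧ (k : Int) < pos.getD kv.1.2 0)) := by
        rw [hitemsmk]
        apply List.filter_congr
        intro kv hkv
        obtain ⟨ix, hix, hgx, hpx⟩ := hrank kv.1.1 (hmemS kv hkv).1
        obtain ⟨iy, hiy, hgy, hpy⟩ := hrank kv.1.2 (hmemS kv hkv).2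
        have hgx' : sites[ix] = kv.1.1 := by
          have := List.getElem?_eq_getElem hix
          rw [this] at hgx
          exact Option.some.inj hgx
        have hgy' : sites[iy] = kv.1.2 := by
          have := List.getElem?_eq_getElem hiy
          rw [this] at hgy
          exact Option.some.inj hgy
        have hcov := cover_iff sites hpw ix iy k hix hiy hk1
        rw [hgx', hgy'] at hcov
        have hda : sites.getD k 0 = sites[k] := List.getD_eq_getElem sites 0 hkn
        have hdb : sites.getD (k + 1) 0 = sites[k + 1] := List.getD_eq_getElem sites 0 hk1
        rw [hda, hdb, hpx, hpy, decide_eq_decide]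
        have hkv1 : kv.1 = (kv.1.1, kv.1.2) := rfl
        rw [show kv.1 = (kv.1.1, kv.1.2) from rfl] at hcov ⊢
        constructor
        · intro h
          exact hcov.mp h
        · intro h
          exact hcov.mpr h
      rw [aPairVal, hfe, hbget']
    -- the two final folds coincide
    rw [aPairs_range (PySem.Dict.mk ivsB) sites _]
    rw [foldl_pyRange_range ((sites.length : Int) - 1) _ _]
    have hM : ((sites.length : Int) - 1).toNat = n - 1 := by omega
    rw [hM]
    refine congrArg (fun d : PySem.Dict (Int × Int) (List Int) =>
      List.map (fun kv => (kv.1.1, kv.1.2, kv.2)) d.items) ?_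
    apply PySem.List.foldl_congr_mem
    intro acc k hkmem
    have hk : k < n - 1 := List.mem_range.mp hkmem
    have hkn : k < n := by omega
    have hk1 : k + 1 < n := by omega
    have hc1 : PySem.List.pyGetD sites ((k : Nat) : Int) 0 = sites.getD k 0 :=
      PySem.List.pyGetD_natCast sites k 0
    have hc2 : PySem.List.pyGetD sites (((k : Nat) : Int) + 1) 0 = sites.getD (k + 1) 0 := by
      rw [show ((k : Nat) : Int) + 1 = (((k + 1 : Nat)) : Int) by push_cast; ring]
      exact PySem.List.pyGetD_natCast sites (k + 1) 0
    rw [hc1, hc2, hval k hk]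
  -- (match arms for shorter new_region are impossible under Pre_)
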